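-- pv_equiv track=rewrite | github.com/hankcs/HanLP | hanlp/datasets/parsing/loaders/_ctb_utils.py | split_str_to_trees
-- ===== SOURCE A (Python) =====
-- def split_str_to_trees(text: str):
--     trees = []
--     buffer = []
--     for line in text.split('\n'):
--         if not line.strip():
--             continue
--         if line.startswith('('):
--             if buffer:
--                 trees.append('\n'.join(buffer).strip())
--                 buffer = []
--         buffer.append(line)
--     if buffer:
--         trees.append('\n'.join(buffer).strip())
--     return trees
-- ===== SOURCE B (Python) =====
-- def split_str_to_trees(text: str):
--     # Drop blank lines first, then cut the remaining lines into runs: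
--     # each run starts at a line beginning with '(' (or at the first kept line)
--     # and extends up to (not including) the next '('-leading line.
--     lines = [l for l in text.split('\n') if l.strip()]
--     trees = []
--     i, n = 0, len(lines)
--     while i < n:
--         k = i + 1
--         while k < n and not lines[k].startswith('('):
--             k += 1
--         trees.append('\n'.join(lines[i:k]).strip())
--         i = k
--     return trees
-- ===== Notes on version B (the rewrite author's own statement) =====
-- stated objective: alternative
-- what changed: Replaces A's single-pass buffer/flush state machine with a filter-then-group decomposition: drop blank lines first, then repeatedly scan for the next '('-leading line and emit each run as one stripped chunk.
import Mathlib
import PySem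

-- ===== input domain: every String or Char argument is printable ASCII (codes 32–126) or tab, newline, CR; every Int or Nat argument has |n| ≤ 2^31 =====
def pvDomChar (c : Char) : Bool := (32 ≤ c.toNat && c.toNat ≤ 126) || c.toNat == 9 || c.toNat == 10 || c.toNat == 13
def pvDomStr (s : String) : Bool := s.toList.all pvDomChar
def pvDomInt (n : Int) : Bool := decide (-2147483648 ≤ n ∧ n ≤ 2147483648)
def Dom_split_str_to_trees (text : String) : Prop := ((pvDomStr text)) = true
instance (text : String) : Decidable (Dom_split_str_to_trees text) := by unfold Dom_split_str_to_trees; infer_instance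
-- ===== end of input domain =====

-- B replaces A's buffer/flush state machine by a filter-then-group decomposition (alternative, same cost).


-- ===== PORT A =====
-- one step of A's for-loop: state = (trees, buffer)
def pvStepA (st : List String × List String) (line : String) : List String × List String :=
  if PySem.Str.strip line = "" then st
  else
    let st :=
      if PySem.Str.startswith line "(" && !st.2.isEmpty then
        (st.1 ++ [PySem.Str.strip (PySem.Str.join "\n" st.2)], ([] : List String))
      else st
    (st.1, st.2 ++ [line])

def split_str_to_trees (text : String) : List String :=
  -- text.split('\n'): split? is total for a non-empty separator
  let st := ((PySem.Str.split? text "\n").getD []).foldl pvStepA ([], [])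
  if !st.2.isEmpty then st.1 ++ [PySem.Str.strip (PySem.Str.join "\n" st.2)] else st.1

-- ===== PORT B =====
-- B's outer while-loop consumes the kept lines run by run: each run is its first line
-- plus the following lines up to the next '('-leading line (the inner index scan = takeWhile/dropWhile).
def pvGroupsB : List String → List String
  | [] => []
  | l :: ls =>
      PySem.Str.strip (PySem.Str.join "\n" (l :: ls.takeWhile (fun x => !PySem.Str.startswith x "("))) ::
        pvGroupsB (ls.dropWhile (fun x => !PySem.Str.startswith x "("))
termination_by ls => ls.length
decreasing_by
  simpa using Nat.lt_succ_of_le (List.length_dropWhile_le _ _)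

def split_str_to_trees_alt (text : String) : List String :=
  pvGroupsB (((PySem.Str.split? text "\n").getD []).filter (fun l => !(PySem.Str.strip l == "")))

-- ===== PRECONDITION & SPEC =====
def Spec_split_str_to_trees (text : String) (out : List String) : Prop := out = split_str_to_trees_alt text
instance (text : String) (out : List String) : Decidable (Spec_split_str_to_trees text out) := by unfold Spec_split_str_to_trees; infer_instance

-- ===== CLAIM (what is proved, stated in full; the proofs are below) =====
def Claim_equal_split_str_to_trees : Prop := ∀ (text : String), Dom_split_str_to_trees text → Spec_split_str_to_trees text (split_str_to_trees text)

-- ===== LEMMAS AND PROOFS =====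

-- A's finishing step
def pvFinishA (st : List String × List String) : List String :=
  if !st.2.isEmpty then st.1 ++ [PySem.Str.strip (PySem.Str.join "\n" st.2)] else st.1

-- A's step without the blank-line branch
def pvStepA' (st : List String × List String) (line : String) : List String × List String :=
  let st :=
    if PySem.Str.startswith line "(" && !st.2.isEmpty then
      (st.1 ++ [PySem.Str.strip (PySem.Str.join "\n" st.2)], ([] : List String))
    else st
  (st.1, st.2 ++ [line])

theorem pvStepA_blank (st : List String × List String) (l : String)
    (h : PySem.Str.strip l = "") : pvStepA st l = st := by
  simp [pvStepA, h]

theorem pvStepA_nonblank (st : List String × List String) (l : String)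
    (h : ¬ PySem.Str.strip l = "") : pvStepA st l = pvStepA' st l := by
  simp [pvStepA, pvStepA', h]

theorem pvStepA'_pos (acc buf : List String) (l : String)
    (h : PySem.Chars.startswith l.toList ['('] = true) (hb : buf ≠ []) :
    pvStepA' (acc, buf) l = (acc ++ [PySem.Str.strip (PySem.Str.join "\n" buf)], [l]) := by
  simp [pvStepA', h, hb]

theorem pvStepA'_neg (acc buf : List String) (l : String)
    (h : PySem.Chars.startswith l.toList ['('] = false) :
    pvStepA' (acc, buf) l = (acc, buf ++ [l]) := by
  simp [pvStepA', h]

-- folding A's step over all lines = folding the blank-free step over the kept lines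
theorem pv_fold_filter (ls : List String) (st : List String × List String) :
    ls.foldl pvStepA st = (ls.filter (fun l => !(PySem.Str.strip l == ""))).foldl pvStepA' st := by
  induction ls generalizing st with
  | nil => rfl
  | cons l ls ih =>
      by_cases h : PySem.Str.strip l = ""
      · rw [List.foldl_cons, pvStepA_blank st l h, ih, List.filter_cons]
        simp [h]
      · rw [List.foldl_cons, pvStepA_nonblank st l h, ih, List.filter_cons]
        simp [h]

-- main invariant: with a non-empty buffer, finishing A's fold yields the current run then B's groups
theorem pv_go_eq (ls : List String) (acc buf : List String) (hb : buf ≠ []) :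
    pvFinishA (ls.foldl pvStepA' (acc, buf)) =
      acc ++ (PySem.Str.strip (PySem.Str.join "\n"
          (buf ++ ls.takeWhile (fun x => !PySem.Str.startswith x "("))) ::
        pvGroupsB (ls.dropWhile (fun x => !PySem.Str.startswith x "("))) := by
  induction ls generalizing acc buf with
  | nil =>
      simp [pvFinishA, hb, pvGroupsB]
  | cons l ls ih =>
      by_cases h : PySem.Chars.startswith l.toList ['('] = true
      · have ht : (l :: ls).takeWhile (fun x => !PySem.Str.startswith x "(") = [] := by
          simp [h]
        have hd : (l :: ls).dropWhile (fun x => !PySem.Str.startswith x "(") = l :: ls := by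
          simp [h]
        rw [List.foldl_cons, pvStepA'_pos acc buf l h hb, ih _ [l] (by simp), ht, hd, pvGroupsB]
        simp
      · rw [Bool.not_eq_true] at h
        have ht : (l :: ls).takeWhile (fun x => !PySem.Str.startswith x "(") =
            l :: ls.takeWhile (fun x => !PySem.Str.startswith x "(") := by
          simp [h]
        have hd : (l :: ls).dropWhile (fun x => !PySem.Str.startswith x "(") =
            ls.dropWhile (fun x => !PySem.Str.startswith x "(") := by
          simp [h]
        rw [List.foldl_cons, pvStepA'_neg acc buf l h, ih _ (buf ++ [l]) (by simp), ht, hd]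
        simp

theorem pv_go_top (ls : List String) :
    pvFinishA (ls.foldl pvStepA' ([], [])) = pvGroupsB ls := by
  cases ls with
  | nil => simp [pvFinishA, pvGroupsB]
  | cons l ls =>
      have h1 : pvStepA' (([] : List String), ([] : List String)) l = ([], [l]) := by
        simp [pvStepA']
      rw [List.foldl_cons, h1, pv_go_eq ls [] [l] (by simp), pvGroupsB]
      simp

-- ===== VERDICT (by name: the statement is the Claim_ definition above) =====
theorem split_str_to_trees_spec : Claim_equal_split_str_to_trees := by
  intro text _
  show split_str_to_trees text = split_str_to_trees_alt text
  unfold split_str_to_trees split_str_to_trees_alt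
  rw [pv_fold_filter]
  exact pv_go_top _
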